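-- pv_equiv track=rewrite | github.com/Boehringer-Ingelheim/TorsionProfiler | src/torsion_profiler/utils/baseclass.py | _split_tasks
-- ===== SOURCE A (Python) =====
-- def _split_tasks(ntasks: int, n_tasks_parallel: int) -> list[list[int]]:
--     """
--     Parallelize the task execution.
--
--     Parameters
--     ----------
--     ntasks: int
--         number of tasks
--     n_tasks_parallel: int
--         parallelization of the tasks
--
--     Returns
--     -------
--     list[list[int]]
--         chunked job list.
--     """
--     task_lengths = ntasks // n_tasks_parallel
--     tasks_offset = ntasks % n_tasks_parallel
--     load_per_task = [
--         task_lengths + 1 if (i < tasks_offset) else task_lengths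
--         for i in range(n_tasks_parallel)
--     ]
--     task_splits = [
--         list(range(sum(load_per_task[:n]), sum(load_per_task[: n + 1])))
--         for n in range(n_tasks_parallel)
--     ]
--     return task_splits
-- ===== SOURCE B (Python) =====
-- def _split_tasks(ntasks: int, n_tasks_parallel: int) -> list[list[int]]:
--     q, r = divmod(ntasks, n_tasks_parallel)
--     chunks = []
--     start = 0
--     for i in range(n_tasks_parallel):
--         end = start + q + (1 if i < r else 0)
--         chunks.append(list(range(start, end)))
--         start = end
--     return chunks
-- ===== Notes on version B (the rewrite author's own statement) =====
-- stated objective: faster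
-- what changed: single pass keeping a running offset instead of re-summing the prefix of the load list for every chunk
import Mathlib
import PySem

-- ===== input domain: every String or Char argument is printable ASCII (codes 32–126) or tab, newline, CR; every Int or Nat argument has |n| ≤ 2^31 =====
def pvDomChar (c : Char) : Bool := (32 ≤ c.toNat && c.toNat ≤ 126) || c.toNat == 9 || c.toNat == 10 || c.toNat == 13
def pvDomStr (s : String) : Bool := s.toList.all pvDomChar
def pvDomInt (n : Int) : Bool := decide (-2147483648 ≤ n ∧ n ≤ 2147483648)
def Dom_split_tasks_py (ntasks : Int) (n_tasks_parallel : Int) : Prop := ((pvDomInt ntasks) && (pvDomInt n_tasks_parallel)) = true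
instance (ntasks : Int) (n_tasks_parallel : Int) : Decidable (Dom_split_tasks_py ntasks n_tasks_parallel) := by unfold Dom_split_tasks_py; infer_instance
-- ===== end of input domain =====

-- B replaces A's repeated prefix-sum slicing with a single pass keeping a running offset.


-- ===== PORT A =====
def split_tasks_py (ntasks : Int) (n_tasks_parallel : Int) : List (List Int) :=
  let task_lengths := PySem.Int.floordiv ntasks n_tasks_parallel
  let tasks_offset := PySem.Int.mod ntasks n_tasks_parallel
  let load_per_task := (PySem.List.pyRange 0 n_tasks_parallel 1).map
    (fun i => if i < tasks_offset then task_lengths + 1 else task_lengths)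
  (PySem.List.pyRange 0 n_tasks_parallel 1).map (fun n =>
    PySem.List.pyRange (PySem.List.slice load_per_task none (some n)).sum
      (PySem.List.slice load_per_task none (some (n + 1))).sum 1)

-- ===== PORT B =====
def split_tasks_py_alt (ntasks : Int) (n_tasks_parallel : Int) : List (List Int) :=
  let q := PySem.Int.floordiv ntasks n_tasks_parallel
  let r := PySem.Int.mod ntasks n_tasks_parallel
  ((PySem.List.pyRange 0 n_tasks_parallel 1).foldl
    (fun (st : List (List Int) × Int) i =>
      let e := st.2 + q + (if i < r then 1 else 0)
      (st.1 ++ [PySem.List.pyRange st.2 e 1], e))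
    ([], 0)).1

-- ===== PRECONDITION & SPEC =====
-- Python raises ZeroDivisionError exactly when n_tasks_parallel = 0.
def Pre_split_tasks_py (ntasks : Int) (n_tasks_parallel : Int) : Prop := n_tasks_parallel ≠ 0
instance (ntasks : Int) (n_tasks_parallel : Int) : Decidable (Pre_split_tasks_py ntasks n_tasks_parallel) := by unfold Pre_split_tasks_py; infer_instance
def pvWitness_split_tasks_py : Int × Int := (10, 3)
def Spec_split_tasks_py (ntasks : Int) (n_tasks_parallel : Int) (out : List (List Int)) : Prop := out = split_tasks_py_alt ntasks n_tasks_parallel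
instance (ntasks : Int) (n_tasks_parallel : Int) (out : List (List Int)) : Decidable (Spec_split_tasks_py ntasks n_tasks_parallel out) := by unfold Spec_split_tasks_py; infer_instance

-- ===== CLAIM (what is proved, stated in full; the proofs are below) =====
def Claim_equal_split_tasks_py : Prop := ∀ (ntasks : Int) (n_tasks_parallel : Int), Dom_split_tasks_py ntasks n_tasks_parallel → Pre_split_tasks_py ntasks n_tasks_parallel → Spec_split_tasks_py ntasks n_tasks_parallel (split_tasks_py ntasks n_tasks_parallel)

-- ===== LEMMAS AND PROOFS =====

-- B's fold over pyRange a b 1, starting offset s, appends one chunk per index,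
-- each chunk delimited by partial sums of f over the range's prefix.
theorem pv_fold_chunks (f : Int → Int) :
    ∀ (k : Nat) (a b : Int), (b - a).toNat = k → ∀ (acc : List (List Int)) (s : Int),
    ((PySem.List.pyRange a b 1).foldl
      (fun (st : List (List Int) × Int) i =>
        (st.1 ++ [PySem.List.pyRange st.2 (st.2 + f i) 1], st.2 + f i))
      (acc, s)).1
    = acc ++ (PySem.List.pyRange a b 1).map (fun n =>
        PySem.List.pyRange (s + ((PySem.List.pyRange a n 1).map f).sum)
          (s + ((PySem.List.pyRange a (n + 1) 1).map f).sum) 1) := by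
  intro k
  induction k with
  | zero =>
    intro a b hk acc s
    rw [PySem.List.pyRange_one_eq_nil (by omega)]
    simp
  | succ k ih =>
    intro a b hk acc s
    have hab : a < b := by omega
    rw [PySem.List.pyRange_one_cons hab]
    simp only [List.foldl_cons, List.map_cons]
    rw [ih (a + 1) b (by omega) (acc ++ [PySem.List.pyRange s (s + f a) 1]) (s + f a)]
    rw [List.append_assoc]
    congr 1
    simp only [List.cons_append, List.nil_append]
    congr 1
    · rw [PySem.List.pyRange_one_eq_nil (le_refl a), PySem.List.pyRange_one_singleton]
      simp
    · apply List.map_congr_left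
      intro n hn
      have hn' := (PySem.List.mem_pyRange_one.mp hn)
      rw [PySem.List.pyRange_one_cons (show a < n by omega),
          PySem.List.pyRange_one_cons (show a < n + 1 by omega)]
      simp only [List.map_cons, List.sum_cons]
      ring_nf

-- slicing the first n elements of the load list is summing f over pyRange 0 n 1
theorem pv_slice_prefix (f : Int → Int) (p n : Int) (h0 : 0 ≤ n) (hnp : n ≤ p) :
    PySem.List.slice ((PySem.List.pyRange 0 p 1).map f) none (some n)
      = (PySem.List.pyRange 0 n 1).map f := by
  rw [PySem.List.slice_to _ h0, ← List.map_take]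
  congr 1
  rw [PySem.List.pyRange_one_append 0 n p h0 hnp,
      List.take_append_of_le_length (by rw [PySem.List.length_pyRange_one]; omega)]
  rw [List.take_of_length_le (by rw [PySem.List.length_pyRange_one]; omega)]

-- ===== VERDICT (by name: the statement is the Claim_ definition above) =====
theorem split_tasks_py_spec : Claim_equal_split_tasks_py := by
  intro ntasks p _ _
  unfold Spec_split_tasks_py split_tasks_py split_tasks_py_alt
  dsimp only
  generalize PySem.Int.floordiv ntasks p = q
  generalize PySem.Int.mod ntasks p = r
  have hstep : (fun (st : List (List Int) × Int) i =>
      (st.1 ++ [PySem.List.pyRange st.2 (st.2 + q + (if i < r then 1 else 0)) 1],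
        st.2 + q + (if i < r then 1 else 0)))
    = (fun (st : List (List Int) × Int) i =>
      (st.1 ++ [PySem.List.pyRange st.2 (st.2 + (fun j => if j < r then q + 1 else q) i) 1],
        st.2 + (fun j => if j < r then q + 1 else q) i)) := by
    funext st i
    by_cases h : i < r <;> simp [h, add_assoc]
  rw [hstep, pv_fold_chunks (fun j => if j < r then q + 1 else q) (p - 0).toNat 0 p rfl [] 0]
  simp only [List.nil_append]
  apply List.map_congr_left
  intro n hn
  have hn' := PySem.List.mem_pyRange_one.mp hn
  rw [pv_slice_prefix (fun j => if j < r then q + 1 else q) p n (by omega) (by omega),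
      pv_slice_prefix (fun j => if j < r then q + 1 else q) p (n + 1) (by omega) (by omega)]
  simp
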